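-- pv_equiv track=rewrite | github.com/Robert-MTZ/Practicas_IA_Segundo_Parcial | Programas_E3_IA/147_Practica_Espacio_de_Versiones_y_AQ_E3_IA.py | initial_hypothesis
-- ===== SOURCE A (Python) =====
-- def initial_hypothesis(X_train, y_train):
--     hypothesis = {}  # Inicializamos la hipótesis como un diccionario vacío
--     for example, label in zip(X_train, y_train):
--         # Iteramos sobre cada ejemplo y su etiqueta de clase
--         for attribute, value in example.items():
--             # Iteramos sobre cada atributo y su valor en el ejemplo
--             if attribute not in hypothesis:
--                 # Si el atributo no está en la hipótesis, lo agregamos con el valor del ejemplo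
--                 hypothesis[attribute] = value
--             elif hypothesis[attribute] != value:
--                 # Si el valor del atributo en la hipótesis no coincide con el valor del ejemplo, lo cambiamos a '?'
--                 hypothesis[attribute] = '?'
--         # Asignamos la etiqueta de clase al atributo 'class' en la hipótesis
--         hypothesis['class'] = label
--     return hypothesis
-- ===== SOURCE B (Python) =====
-- def initial_hypothesis(X_train, y_train):
--     # First pass: group every attribute's values (in first-seen key order) and remember the last label.
--     groups = {}
--     last_label = None
--     for example, label in zip(X_train, y_train):
--         for attribute, value in example.items():
--             groups.setdefault(attribute, []).append(value)
--         groups.setdefault('class', [])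
--         last_label = label
--     # Second pass: an attribute generalizes to its common value, or '?' on any disagreement;
--     # 'class' is simply the last label seen.
--     hypothesis = {}
--     for attribute, values in groups.items():
--         if attribute == 'class':
--             hypothesis[attribute] = last_label
--         elif all(v == values[0] for v in values):
--             hypothesis[attribute] = values[0]
--         else:
--             hypothesis[attribute] = '?'
--     return hypothesis
-- ===== Notes on version B (the rewrite author's own statement) =====
-- stated objective: alternative
-- what changed: A folds each example online, mutating the hypothesis entry-by-entry; B makes one grouping pass collecting every attribute's value list plus the last label, then a second pass that reduces each list to its common value or '?' and sets 'class' to the last label.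
import Mathlib
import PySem

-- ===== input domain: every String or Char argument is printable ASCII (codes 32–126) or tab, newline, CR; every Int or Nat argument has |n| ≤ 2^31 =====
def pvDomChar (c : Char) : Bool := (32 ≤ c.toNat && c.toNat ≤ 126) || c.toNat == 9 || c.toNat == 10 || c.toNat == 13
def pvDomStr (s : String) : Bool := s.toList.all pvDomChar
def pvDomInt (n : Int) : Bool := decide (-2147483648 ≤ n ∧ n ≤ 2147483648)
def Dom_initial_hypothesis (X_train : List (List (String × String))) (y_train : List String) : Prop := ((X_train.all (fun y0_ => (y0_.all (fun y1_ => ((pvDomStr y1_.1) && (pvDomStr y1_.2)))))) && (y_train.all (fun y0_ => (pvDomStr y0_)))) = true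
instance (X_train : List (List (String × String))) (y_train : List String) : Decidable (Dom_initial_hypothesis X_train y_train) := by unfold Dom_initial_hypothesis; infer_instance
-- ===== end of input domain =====

-- B replaces A's online entry-by-entry fold with a grouping pass plus a reduction pass (alternative decomposition, same cost).

-- ===== PORT A =====
-- inner loop body of A: one (attribute, value) pair folded into the hypothesis dict
def pvStepA (h : PySem.Dict String String) (av : String × String) : PySem.Dict String String :=
  if h.contains av.1 = false then h.insert av.1 av.2
  else if h.getD av.1 "" ≠ av.2 then h.insert av.1 "?" else h
  -- getD's "" default is unreachable: the branch runs only when the key is present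

-- outer loop body of A: one (example, label) pair
def pvPairA (h : PySem.Dict String String) (p : List (String × String) × String) : PySem.Dict String String :=
  (p.1.foldl pvStepA h).insert "class" p.2

def initial_hypothesis (X_train : List (List (String × String))) (y_train : List String) : List (String × String) :=
  ((X_train.zip y_train).foldl pvPairA PySem.Dict.empty).items

-- ===== PORT B =====
-- groups.setdefault(attribute, []).append(value)
def pvStepB (g : PySem.Dict String (List String)) (av : String × String) : PySem.Dict String (List String) :=
  g.modify av.1 [] (· ++ [av.2])

-- one (example, label) pair of B's first pass: grouping dict and last label
def pvPairB (st : PySem.Dict String (List String) × Option String) (p : List (String × String) × String) :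
    PySem.Dict String (List String) × Option String :=
  ((p.1.foldl pvStepB st.1).setdefault "class" [], some p.2)

-- values[0] if all(v == values[0] for v in values) else '?'  ([] case unreachable in B: non-'class' groups are nonempty)
def pvReduce (vs : List String) : String :=
  match vs with
  | [] => "?"
  | v0 :: _ => if vs.all (fun v => v == v0) then v0 else "?"

-- second-pass value for one groups entry; last_label is an Option only because Python inits it to None (set whenever 'class' exists)
def pvHypVal (lbl : Option String) (av : String × List String) : String :=
  if av.1 = "class" then lbl.getD "" else pvReduce av.2

def initial_hypothesis_alt (X_train : List (List (String × String))) (y_train : List String) : List (String × String) :=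
  let st := (X_train.zip y_train).foldl pvPairB (PySem.Dict.empty, none)
  (st.1.items.foldl (fun h av => h.insert av.1 (pvHypVal st.2 av)) PySem.Dict.empty).items

-- ===== PRECONDITION & SPEC =====
def Spec_initial_hypothesis (X_train : List (List (String × String))) (y_train : List String) (out : List (String × String)) : Prop := out = initial_hypothesis_alt X_train y_train
instance (X_train : List (List (String × String))) (y_train : List String) (out : List (String × String)) : Decidable (Spec_initial_hypothesis X_train y_train out) := by unfold Spec_initial_hypothesis; infer_instance

-- ===== CLAIM (what is proved, stated in full; the proofs are below) =====
def Claim_equal_initial_hypothesis : Prop := ∀ (X_train : List (List (String × String))) (y_train : List String), Dom_initial_hypothesis X_train y_train → Spec_initial_hypothesis X_train y_train (initial_hypothesis X_train y_train)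

-- ===== LEMMAS AND PROOFS =====

-- the values of attribute k contributed by the examples of ps, in order
def pvValsOf (ps : List (List (String × String) × String)) (k : String) : List String :=
  ps.flatMap (fun p => (p.1.filter (fun av => av.1 == k)).map (·.2))

-- A's per-key update as a function on the optional current entry
def pvStep1 (o : Option String) (v : String) : Option String :=
  match o with
  | none => some v
  | some w => if w ≠ v then some "?" else some w

theorem pvStep1_q (v : String) : pvStep1 (some "?") v = some "?" := by simp [pvStep1]
theorem pvFoldStep1_q (vs : List String) : vs.foldl pvStep1 (some "?") = some "?" := by
  induction vs with
  | nil => rfl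
  | cons v vs ih => simp [List.foldl_cons, pvStep1_q, ih]
theorem pvFoldStep1_some (vs : List String) (w : String) :
    vs.foldl pvStep1 (some w) = some (if vs.all (fun v => v == w) then w else "?") := by
  induction vs with
  | nil => simp
  | cons v vs ih =>
    by_cases hv : w = v
    · subst hv
      simp [List.foldl_cons, pvStep1, ih]
    · have : pvStep1 (some w) v = some "?" := by simp [pvStep1, hv]
      simp [List.foldl_cons, this, pvFoldStep1_q, List.all_cons, Ne.symm hv]
theorem pvFoldStep1_none (vs : List String) :
    vs.foldl pvStep1 none = match vs with | [] => none | _ => some (pvReduce vs) := by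
  cases vs with
  | nil => rfl
  | cons v vs =>
    have : pvStep1 none v = some v := rfl
    simp [List.foldl_cons, this, pvFoldStep1_some, pvReduce]

theorem pvStepA_get (h : PySem.Dict String String) (av : String × String) (k : String) :
    (pvStepA h av).get? k = if av.1 = k then pvStep1 (h.get? k) av.2 else h.get? k := by
  by_cases hk : av.1 = k
  · subst hk
    cases hg : h.get? av.1 with
    | none =>
      have hc : h.contains av.1 = false := by
        rw [PySem.Dict.contains_eq_isSome_get?, hg]; rfl
      simp [pvStepA, hc, PySem.Dict.get?_insert_self, pvStep1]
    | some w =>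
      have hc : h.contains av.1 = true := by
        rw [PySem.Dict.contains_eq_isSome_get?, hg]; rfl
      have hgd : h.getD av.1 "" = w := PySem.Dict.getD_of_get?_eq_some h "" hg
      by_cases hw : w = av.2
      · simp [pvStepA, hc, hgd, hw, pvStep1, hg]
      · simp [pvStepA, hc, hgd, hw, pvStep1, PySem.Dict.get?_insert_self]
  · have hne : k ≠ av.1 := Ne.symm hk
    unfold pvStepA
    split_ifs <;> simp [PySem.Dict.get?_insert, hne]
theorem pvInnerA_get (ex : List (String × String)) (h : PySem.Dict String String) (k : String) :
    (ex.foldl pvStepA h).get? k =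
      ((ex.filter (fun av => av.1 == k)).map (·.2)).foldl pvStep1 (h.get? k) := by
  induction ex generalizing h with
  | nil => rfl
  | cons av ex ih =>
    by_cases hk : av.1 = k
    · simp [List.foldl_cons, ih, pvStepA_get, hk]
    · simp [List.foldl_cons, ih, pvStepA_get, hk]
theorem pvA_get (ps : List (List (String × String) × String)) (h : PySem.Dict String String)
    (k : String) (hk : k ≠ "class") :
    (ps.foldl pvPairA h).get? k = (pvValsOf ps k).foldl pvStep1 (h.get? k) := by
  induction ps generalizing h with
  | nil => rfl
  | cons p ps ih =>
    have hcl : (pvPairA h p).get? k = ((p.1.filter (fun av => av.1 == k)).map (·.2)).foldl pvStep1 (h.get? k) := by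
      unfold pvPairA
      rw [PySem.Dict.get?_insert_of_ne _ _ hk, pvInnerA_get]
    simp only [List.foldl_cons, ih, hcl, pvValsOf, List.flatMap_cons, List.foldl_append]
theorem pvA_class (ps : List (List (String × String) × String)) (h : PySem.Dict String String) :
    (ps.foldl pvPairA h).get? "class" = ps.foldl (fun (_ : Option String) p => some p.2) (h.get? "class") := by
  induction ps generalizing h with
  | nil => rfl
  | cons p ps ih =>
    simp only [List.foldl_cons, ih, pvPairA, PySem.Dict.get?_insert_self]

theorem pvB_getD (ps : List (List (String × String) × String))
    (st : PySem.Dict String (List String) × Option String) (k : String) (hk : k ≠ "class") :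
    (ps.foldl pvPairB st).1.getD k [] = st.1.getD k [] ++ pvValsOf ps k := by
  induction ps generalizing st with
  | nil => simp [pvValsOf]
  | cons p ps ih =>
    have hinner : (p.1.foldl pvStepB st.1).getD k [] =
        st.1.getD k [] ++ (p.1.filter (fun av => av.1 == k)).map (·.2) := by
      have he : pvStepB = fun (d : PySem.Dict String (List String)) (p : String × String) =>
          d.modify p.1 [] (fun x => x ++ [p.2]) := rfl
      rw [he, PySem.Dict.getD_foldl_modify_append]
    have hsd : (pvPairB st p).1.getD k [] = (p.1.foldl pvStepB st.1).getD k [] := by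
      unfold pvPairB
      cases hc : (p.1.foldl pvStepB st.1).contains "class" with
      | true => simp [PySem.Dict.setdefault_of_contains _ _ hc]
      | false =>
        simp [PySem.Dict.setdefault_of_not_contains _ _ hc, PySem.Dict.getD_insert, hk]
    simp only [List.foldl_cons, ih, hsd, hinner, pvValsOf, List.flatMap_cons, List.append_assoc]

theorem pvB_label (ps : List (List (String × String) × String))
    (st : PySem.Dict String (List String) × Option String) :
    (ps.foldl pvPairB st).2 = ps.foldl (fun (_ : Option String) p => some p.2) st.2 := by
  induction ps generalizing st with
  | nil => rfl
  | cons p ps ih => simp only [List.foldl_cons, ih, pvPairB]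

-- keys of one A-step / B-step both grow like Set.add
theorem pvStepA_keys (h : PySem.Dict String String) (av : String × String) :
    (pvStepA h av).keys = PySem.Set.add h.keys av.1 := by
  have hiff := PySem.Dict.contains_iff_mem_keys h av.1
  unfold pvStepA PySem.Set.add PySem.Set.contains
  cases hc : h.contains av.1 with
  | false =>
    have hm : av.1 ∉ h.keys := fun hm => by simp [hiff.mpr hm] at hc
    simp [PySem.Dict.keys_insert_of_not_contains _ _ hc, hm]
  | true =>
    have hm : av.1 ∈ h.keys := hiff.mp hc
    have hkc : h.keys.contains av.1 = true := by simp [List.contains_eq_mem, hm]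
    rw [if_pos hkc]
    split_ifs <;> simp [PySem.Dict.keys_insert_of_contains _ _ hc]

theorem pvStepB_keys (g : PySem.Dict String (List String)) (av : String × String) :
    (pvStepB g av).keys = PySem.Set.add g.keys av.1 := by
  have hiff := PySem.Dict.contains_iff_mem_keys g av.1
  unfold pvStepB PySem.Set.add PySem.Set.contains
  rw [PySem.Dict.keys_modify]
  cases hc : g.contains av.1 with
  | false =>
    have hm : av.1 ∉ g.keys := fun hm => by simp [hiff.mpr hm] at hc
    simp [PySem.Dict.keys_insert_of_not_contains _ _ hc, List.contains_eq_mem, hm]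
  | true =>
    have hm : av.1 ∈ g.keys := hiff.mp hc
    simp [PySem.Dict.keys_insert_of_contains _ _ hc, List.contains_eq_mem, hm]

theorem pvKeys_eq (ps : List (List (String × String) × String))
    (h : PySem.Dict String String) (st : PySem.Dict String (List String) × Option String)
    (hkeys : h.keys = st.1.keys) :
    (ps.foldl pvPairA h).keys = (ps.foldl pvPairB st).1.keys := by
  induction ps generalizing h st with
  | nil => exact hkeys
  | cons p ps ih =>
    apply ih
    -- keys after one pair step agree
    have hinner : ∀ (ex : List (String × String)) (h : PySem.Dict String String)
        (g : PySem.Dict String (List String)), h.keys = g.keys →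
        (ex.foldl pvStepA h).keys = (ex.foldl pvStepB g).keys := by
      intro ex
      induction ex with
      | nil => intro h g hk; exact hk
      | cons av ex ihe =>
        intro h g hk
        apply ihe
        rw [pvStepA_keys, pvStepB_keys, hk]
    have h1 := hinner p.1 h st.1 hkeys
    -- class step
    unfold pvPairA pvPairB
    cases hc : (p.1.foldl pvStepB st.1).contains "class" with
    | true =>
      have hcA : (p.1.foldl pvStepA h).contains "class" = true := by
        rw [PySem.Dict.contains_iff_mem_keys] at hc ⊢; rw [h1]; exact hc
      simp [PySem.Dict.setdefault_of_contains _ _ hc,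
        PySem.Dict.keys_insert_of_contains _ _ hcA, h1]
    | false =>
      have hcA : (p.1.foldl pvStepA h).contains "class" = false := by
        cases hcc : (p.1.foldl pvStepA h).contains "class" with
        | false => rfl
        | true =>
          rw [PySem.Dict.contains_iff_mem_keys, h1, ← PySem.Dict.contains_iff_mem_keys] at hcc
          rw [hcc] at hc; exact Bool.noConfusion hc
      simp [PySem.Dict.setdefault_of_not_contains _ _ hc,
        PySem.Dict.keys_insert_of_not_contains _ _ hcA,
        PySem.Dict.keys_insert_of_not_contains _ _ hc, h1]

theorem pvA_nodup (ps : List (List (String × String) × String)) (h : PySem.Dict String String)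
    (hnd : h.keys.Nodup) : (ps.foldl pvPairA h).keys.Nodup := by
  induction ps generalizing h with
  | nil => exact hnd
  | cons p ps ih =>
    apply ih
    unfold pvPairA
    apply PySem.Dict.nodup_keys_insert
    clear ih
    induction p.1 generalizing h with
    | nil => exact hnd
    | cons av ex ihe =>
      apply ihe
      rw [pvStepA_keys]
      exact PySem.Set.nodup_add _ _ hnd

theorem pvB_nodup (ps : List (List (String × String) × String))
    (st : PySem.Dict String (List String) × Option String)
    (hnd : st.1.keys.Nodup) : (ps.foldl pvPairB st).1.keys.Nodup := by
  induction ps generalizing st with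
  | nil => exact hnd
  | cons p ps ih =>
    apply ih
    show ((p.1.foldl pvStepB st.1).setdefault "class" []).keys.Nodup
    have hin : (p.1.foldl pvStepB st.1).keys.Nodup := by
      clear ih
      induction p.1 generalizing st with
      | nil => exact hnd
      | cons av ex ihe =>
        apply ihe (st := ((pvStepB st.1 av), st.2))
        rw [pvStepB_keys]
        exact PySem.Set.nodup_add _ _ hnd
    cases hc : (p.1.foldl pvStepB st.1).contains "class" with
    | true => rw [PySem.Dict.setdefault_of_contains _ _ hc]; exact hin
    | false =>
      rw [PySem.Dict.setdefault_of_not_contains _ _ hc]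
      exact PySem.Dict.nodup_keys_insert _ _ _ hin

theorem pv_main (X_train : List (List (String × String))) (y_train : List String) :
    initial_hypothesis X_train y_train = initial_hypothesis_alt X_train y_train := by
  unfold initial_hypothesis initial_hypothesis_alt
  set ps := X_train.zip y_train with hps
  set A := ps.foldl pvPairA PySem.Dict.empty with hA
  set st := ps.foldl pvPairB (PySem.Dict.empty, none) with hst
  have hndA : A.keys.Nodup := pvA_nodup ps _ PySem.Dict.nodup_keys_empty
  have hndG : st.1.keys.Nodup := pvB_nodup ps _ PySem.Dict.nodup_keys_empty
  have hkeys : A.keys = st.1.keys := pvKeys_eq ps _ _ (by simp [PySem.Dict.keys_empty])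
  -- B's second pass over fresh distinct keys is a map over the items
  have hfresh : (st.1.items.foldl (fun h av => h.insert av.1 (pvHypVal st.2 av)) PySem.Dict.empty).items
      = st.1.items.map (fun av => (av.1, pvHypVal st.2 av)) := by
    have := PySem.Dict.items_foldl_insert_fresh st.1.items (fun av => av.1)
      (fun av => pvHypVal st.2 av) PySem.Dict.empty
      (fun a _ => PySem.Dict.contains_empty _) (by exact hndG)
    simpa using this
  rw [hfresh]
  rw [PySem.Dict.items_eq_map_keys A hndA "", PySem.Dict.items_eq_map_keys st.1 hndG []]
  rw [List.map_map, hkeys]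
  apply List.map_congr_left
  intro k hk
  simp only [Function.comp_apply]
  by_cases hc : k = "class"
  · subst hc
    have hA : A.get? "class" = ps.foldl (fun (_ : Option String) p => some p.2) none := by
      rw [hA, pvA_class]
      simp [PySem.Dict.get?_empty]
    have hB : st.2 = ps.foldl (fun (_ : Option String) p => some p.2) none := by
      rw [hst, pvB_label]
    simp only [pvHypVal]
    rw [PySem.Dict.getD_eq_get?_getD, hA, hB]
    simp
  · have hvalsA : A.get? k = (pvValsOf ps k).foldl pvStep1 none := by
      rw [hA, pvA_get ps _ k hc]
      simp [PySem.Dict.get?_empty]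
    have hvalsB : st.1.getD k [] = pvValsOf ps k := by
      rw [hst, pvB_getD ps _ k hc]
      simp [PySem.Dict.getD_empty]
    have hne : pvValsOf ps k ≠ [] := by
      intro hnil
      rw [hnil] at hvalsA
      simp only [List.foldl_nil] at hvalsA
      exact ((PySem.Dict.get?_eq_none_iff_not_mem_keys A k).mp hvalsA) (hkeys ▸ hk)
    obtain ⟨v, vs, hvv⟩ := List.exists_cons_of_ne_nil hne
    have hred : A.get? k = some (pvReduce (pvValsOf ps k)) := by
      rw [hvalsA, pvFoldStep1_none, hvv]
    rw [PySem.Dict.getD_eq_get?_getD, hred]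
    simp [pvHypVal, hc, hvalsB]

-- ===== VERDICT (by name: the statement is the Claim_ definition above) =====
theorem initial_hypothesis_spec : Claim_equal_initial_hypothesis := by
  intro X_train y_train _
  unfold Spec_initial_hypothesis
  exact pv_main X_train y_train
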